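-- pv_equiv track=rewrite | github.com/akaash198/orbis | backend/Orbisporte/domain/services/m06_fraud_engine/routing_analyzer.py | _hop_distance
-- ===== SOURCE A (Python) =====
-- from typing import Any, Dict, List, Optional, Set, Tuple
--
-- _ADJACENT: Dict[str, Set[str]] = {
--     "CHN": {"VNM", "MYS", "THA", "IDN", "KOR", "JPN", "HKG", "TWN", "SGP"},
--     "VNM": {"CHN", "THA", "MYS", "SGP"},
--     "IND": {"LKA", "BGD", "NPL", "PAK", "ARE", "SGP"},
--     "ARE": {"IND", "PAK", "SAU", "OMN", "IRN"},
--     "SGP": {"MYS", "IDN", "THA", "VNM", "CHN", "IND"},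
--     "DEU": {"NLD", "BEL", "FRA", "CHE", "POL", "AUT"},
--     "USA": {"CAN", "MEX", "GBR", "DEU"},
--     "GBR": {"USA", "DEU", "NLD", "BEL", "FRA"},
--     "JPN": {"CHN", "KOR", "TWN", "SGP"},
--     "KOR": {"CHN", "JPN", "SGP"},
--     "TUR": {"RUS", "ARE", "DEU", "GBR", "BGR"},
--     "MYS": {"SGP", "THA", "IDN", "CHN", "VNM"},
--     "THA": {"MYS", "VNM", "CHN", "SGP", "IDN"},
--     "IDN": {"MYS", "SGP", "AUS", "CHN"},
--     "HKG": {"CHN"},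
--     "TWN": {"CHN", "JPN", "SGP"},
--     "PAK": {"ARE", "CHN", "IND"},
--     "BGD": {"IND", "SGP", "CHN"},
--     "LKA": {"IND", "SGP", "ARE"},
--     "AUS": {"IDN", "SGP", "USA"},
--     "SAU": {"ARE", "EGY", "JOR"},
-- }
--
-- def _hop_distance(origin: str, shipment_country: str) -> int:
--     """
--     Estimate routing hops between actual origin and port-of-shipment country.
--     Returns 0 if same, 1 if adjacent, 2 if 1 intermediate, 3+ otherwise.
--     """
--     if origin == shipment_country:
--         return 0
--     if shipment_country in _ADJACENT.get(origin, set()):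
--         return 1
--     # BFS one level deeper
--     for neighbor in _ADJACENT.get(origin, set()):
--         if shipment_country in _ADJACENT.get(neighbor, set()):
--             return 2
--     return 3
-- ===== SOURCE B (Python) =====
-- _CODES = ['CHN', 'HKG', 'IDN', 'JPN', 'KOR', 'MYS', 'SGP', 'THA', 'TWN', 'VNM', 'IND', 'ARE', 'BGD', 'LKA', 'NPL', 'PAK', 'IRN', 'OMN', 'SAU', 'DEU', 'AUT', 'BEL', 'CHE', 'FRA', 'NLD', 'POL', 'USA', 'CAN', 'GBR', 'MEX', 'TUR', 'BGR', 'RUS', 'AUS', 'EGY', 'JOR']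
--
-- _NBRS = [[1, 2, 3, 4, 5, 6, 7, 8, 9], [0], [0, 5, 6, 33], [0, 4, 6, 8], [0, 3, 6], [0, 2, 6, 7, 9], [0, 2, 5, 7, 9, 10], [0, 2, 5, 6, 9], [0, 3, 6], [0, 5, 6, 7], [6, 11, 12, 13, 14, 15], [10, 15, 16, 17, 18], [0, 6, 10], [6, 10, 11], [], [0, 10, 11], [], [], [11, 34, 35], [20, 21, 22, 23, 24, 25], [], [], [], [], [], [], [19, 27, 28, 29], [], [19, 21, 23, 24, 26], [], [11, 19, 28, 31, 32], [], [], [2, 6, 26], [], []]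
--
-- def _hop_distance(origin: str, shipment_country: str) -> int:
--     """Level-by-level BFS over an integer-id adjacency-list graph, capped at two expansions."""
--     if origin == shipment_country:
--         return 0
--     if origin not in _CODES or shipment_country not in _CODES:
--         return 3
--     src = _CODES.index(origin)
--     dst = _CODES.index(shipment_country)
--     frontier = [src]
--     seen = [src]
--     dist = 0
--     for _ in range(2):
--         dist += 1
--         nxt = []
--         for u in frontier:
--             for v in _NBRS[u]:
--                 if v not in seen:
--                     seen.append(v)
--                     nxt.append(v)
--         if dst in nxt:
--             return dist
--         frontier = nxt
--     return 3
-- ===== Notes on version B (the rewrite author's own statement) =====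
-- stated objective: alternative
-- what changed: Replaces A's string-keyed dict of neighbour sets and its equality/adjacency/common-neighbour case chain by a different data structure - an integer-id adjacency-list graph (code table plus neighbour id lists) - explored by a level-by-level frontier/seen BFS capped at two expansions.
import Mathlib
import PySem

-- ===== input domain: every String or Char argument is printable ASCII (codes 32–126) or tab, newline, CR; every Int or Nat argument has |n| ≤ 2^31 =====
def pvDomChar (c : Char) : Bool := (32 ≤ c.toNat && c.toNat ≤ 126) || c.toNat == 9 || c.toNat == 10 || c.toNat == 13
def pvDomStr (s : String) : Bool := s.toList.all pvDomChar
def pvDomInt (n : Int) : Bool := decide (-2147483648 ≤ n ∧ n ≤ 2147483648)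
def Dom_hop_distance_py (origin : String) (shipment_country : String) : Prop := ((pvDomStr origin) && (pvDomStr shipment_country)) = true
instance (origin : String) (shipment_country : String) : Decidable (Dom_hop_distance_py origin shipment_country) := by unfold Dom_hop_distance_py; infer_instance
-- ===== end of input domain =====

-- B replaces A's string-keyed dict of neighbour sets and its three-case chain by a different
-- data structure — an integer-id adjacency-list graph (a code table plus neighbour id lists) —
-- explored by a level-by-level BFS capped at two expansions (objective: alternative, same cost).

-- ===== PORT A =====
-- the module constant _ADJACENT, as a lookup function (keys in source order; each value a set literal)
def pvAdj (c : String) : PySem.Set String :=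
  if c == "CHN" then ["VNM", "MYS", "THA", "IDN", "KOR", "JPN", "HKG", "TWN", "SGP"]
  else if c == "VNM" then ["CHN", "THA", "MYS", "SGP"]
  else if c == "IND" then ["LKA", "BGD", "NPL", "PAK", "ARE", "SGP"]
  else if c == "ARE" then ["IND", "PAK", "SAU", "OMN", "IRN"]
  else if c == "SGP" then ["MYS", "IDN", "THA", "VNM", "CHN", "IND"]
  else if c == "DEU" then ["NLD", "BEL", "FRA", "CHE", "POL", "AUT"]
  else if c == "USA" then ["CAN", "MEX", "GBR", "DEU"]
  else if c == "GBR" then ["USA", "DEU", "NLD", "BEL", "FRA"]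
  else if c == "JPN" then ["CHN", "KOR", "TWN", "SGP"]
  else if c == "KOR" then ["CHN", "JPN", "SGP"]
  else if c == "TUR" then ["RUS", "ARE", "DEU", "GBR", "BGR"]
  else if c == "MYS" then ["SGP", "THA", "IDN", "CHN", "VNM"]
  else if c == "THA" then ["MYS", "VNM", "CHN", "SGP", "IDN"]
  else if c == "IDN" then ["MYS", "SGP", "AUS", "CHN"]
  else if c == "HKG" then ["CHN"]
  else if c == "TWN" then ["CHN", "JPN", "SGP"]
  else if c == "PAK" then ["ARE", "CHN", "IND"]
  else if c == "BGD" then ["IND", "SGP", "CHN"]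
  else if c == "LKA" then ["IND", "SGP", "ARE"]
  else if c == "AUS" then ["IDN", "SGP", "USA"]
  else if c == "SAU" then ["ARE", "EGY", "JOR"]
  else PySem.Set.empty

-- the 'for neighbor in _ADJACENT.get(origin, set()): if … return 2' loop is an existence test
-- over a set (order-independent), ported as List.any
def hop_distance_py (origin : String) (shipment_country : String) : Int :=
  if origin == shipment_country then 0
  else if PySem.Set.contains (pvAdj origin) shipment_country then 1
  else if (pvAdj origin).any (fun neighbor => PySem.Set.contains (pvAdj neighbor) shipment_country) then 2
  else 3

-- ===== PORT B =====
-- B's module constants: the code table _CODES and the id adjacency lists _NBRS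
def pvCodes : List String := ["CHN", "HKG", "IDN", "JPN", "KOR", "MYS", "SGP", "THA", "TWN", "VNM", "IND", "ARE", "BGD", "LKA", "NPL", "PAK", "IRN", "OMN", "SAU", "DEU", "AUT", "BEL", "CHE", "FRA", "NLD", "POL", "USA", "CAN", "GBR", "MEX", "TUR", "BGR", "RUS", "AUS", "EGY", "JOR"]
def pvNbrs : List (List Int) := [[1, 2, 3, 4, 5, 6, 7, 8, 9], [0], [0, 5, 6, 33], [0, 4, 6, 8], [0, 3, 6], [0, 2, 6, 7, 9], [0, 2, 5, 7, 9, 10], [0, 2, 5, 6, 9], [0, 3, 6], [0, 5, 6, 7], [6, 11, 12, 13, 14, 15], [10, 15, 16, 17, 18], [0, 6, 10], [6, 10, 11], [], [0, 10, 11], [], [], [11, 34, 35], [20, 21, 22, 23, 24, 25], [], [], [], [], [], [], [19, 27, 28, 29], [], [19, 21, 23, 24, 26], [], [11, 19, 28, 31, 32], [], [], [2, 6, 26], [], []]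

-- the nested 'for u in frontier: for v in _NBRS[u]: if v not in seen: …' loops, state = (seen, nxt)
-- (_NBRS[u] never raises in Source B — u always comes from the tables — so pyGetD's default [] is never used)
def pvExpand (frontier : List Int) (seen : List Int) : List Int × List Int :=
  frontier.foldl (fun st u =>
    (PySem.List.pyGetD pvNbrs u []).foldl (fun st2 v =>
      if st2.1.contains v then st2 else (st2.1 ++ [v], st2.2 ++ [v])) st) (seen, [])

-- the 'for _ in range(2)' loop
def pvLoop2 (dst : Int) : Nat → List Int → List Int → Int → Int
  | 0, _, _, _ => 3
  | k+1, frontier, seen, dist =>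
    let st := pvExpand frontier seen
    if st.2.contains dst then dist + 1
    else pvLoop2 dst k st.2 st.1 (dist + 1)

def hop_distance_py_alt (origin : String) (shipment_country : String) : Int :=
  if origin == shipment_country then 0
  else if !(pvCodes.contains origin) || !(pvCodes.contains shipment_country) then 3
  else
    let src : Int := ((PySem.List.index? pvCodes origin).getD 0 : Nat)
    let dst : Int := ((PySem.List.index? pvCodes shipment_country).getD 0 : Nat)
    pvLoop2 dst 2 [src] [src] 0

-- ===== PRECONDITION & SPEC =====
def Spec_hop_distance_py (origin : String) (shipment_country : String) (out : Int) : Prop := out = hop_distance_py_alt origin shipment_country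
instance (origin : String) (shipment_country : String) (out : Int) : Decidable (Spec_hop_distance_py origin shipment_country out) := by unfold Spec_hop_distance_py; infer_instance

-- ===== CLAIM (what is proved, stated in full; the proofs are below) =====
def Claim_equal_hop_distance_py : Prop := ∀ (origin : String) (shipment_country : String), Dom_hop_distance_py origin shipment_country → Spec_hop_distance_py origin shipment_country (hop_distance_py origin shipment_country)

-- ===== LEMMAS AND PROOFS =====

-- every neighbour set of a known code lies inside the code table (kernel-checked)
theorem adj_codes36 : ((List.range 36).all fun i =>
    (pvAdj (pvCodes.getD i "")).all fun x => pvCodes.contains x) = true := by decide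

theorem beq_key_false (s k : String) (hs : s ∉ pvCodes) (hk : k ∈ pvCodes) : (s == k) = false := by
  rw [beq_eq_false_iff_ne]
  rintro rfl
  exact hs hk

-- every key of _ADJACENT is one of the 36 codes, so unknown origins have an empty neighbour set
theorem adj_of_not_code (s : String) (hs : s ∉ pvCodes) : pvAdj s = [] := by
  unfold pvAdj
  rw [beq_key_false s "CHN" hs (by decide), beq_key_false s "VNM" hs (by decide),
      beq_key_false s "IND" hs (by decide), beq_key_false s "ARE" hs (by decide),
      beq_key_false s "SGP" hs (by decide), beq_key_false s "DEU" hs (by decide),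
      beq_key_false s "USA" hs (by decide), beq_key_false s "GBR" hs (by decide),
      beq_key_false s "JPN" hs (by decide), beq_key_false s "KOR" hs (by decide),
      beq_key_false s "TUR" hs (by decide), beq_key_false s "MYS" hs (by decide),
      beq_key_false s "THA" hs (by decide), beq_key_false s "IDN" hs (by decide),
      beq_key_false s "HKG" hs (by decide), beq_key_false s "TWN" hs (by decide),
      beq_key_false s "PAK" hs (by decide), beq_key_false s "BGD" hs (by decide),
      beq_key_false s "LKA" hs (by decide), beq_key_false s "AUS" hs (by decide),
      beq_key_false s "SAU" hs (by decide)]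
  rfl

-- every neighbour string in _ADJACENT is one of the 36 codes
theorem adj_sub_codes (c s : String) (h : s ∈ pvAdj c) : s ∈ pvCodes := by
  by_cases hc : c ∈ pvCodes
  · obtain ⟨i, hi, hci⟩ := List.mem_iff_getElem.1 hc
    have h2 := adj_codes36
    simp only [List.all_eq_true, List.mem_range] at h2
    have h3 := h2 i hi
    rw [List.getD_eq_getElem _ _ hi, hci] at h3
    have h4 := h3 s h
    rwa [List.contains_eq_mem, decide_eq_true_eq] at h4
  · rw [adj_of_not_code c hc] at h
    cases h

-- on the 36 x 36 pairs of known codes the two ports agree (checked by the kernel)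
set_option maxRecDepth 4000 in
theorem main36 : ((List.range 36).all fun i => (List.range 36).all fun j =>
    hop_distance_py (pvCodes.getD i "") (pvCodes.getD j "") ==
      hop_distance_py_alt (pvCodes.getD i "") (pvCodes.getD j "")) = true := by decide

theorem hop_eq (o t : String) : hop_distance_py o t = hop_distance_py_alt o t := by
  by_cases h0 : o = t
  · subst h0
    unfold hop_distance_py hop_distance_py_alt
    rw [beq_self_eq_true]
    rfl
  · have hbe : (o == t) = false := beq_eq_false_iff_ne.mpr h0
    by_cases ho : o ∈ pvCodes
    · by_cases ht : t ∈ pvCodes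
      · obtain ⟨i, hi, hoi⟩ := List.mem_iff_getElem.1 ho
        obtain ⟨j, hj, htj⟩ := List.mem_iff_getElem.1 ht
        have h := main36
        simp only [List.all_eq_true, List.mem_range] at h
        have h := h i hi j hj
        rw [List.getD_eq_getElem _ _ hi, List.getD_eq_getElem _ _ hj, hoi, htj] at h
        exact eq_of_beq h
      · have hc1 : PySem.Set.contains (pvAdj o) t = false := by
          rw [Bool.eq_false_iff]
          intro hc
          exact ht (adj_sub_codes o t ((PySem.Set.contains_iff _ _).1 hc))
        have hc2 : ((pvAdj o).any fun neighbor => PySem.Set.contains (pvAdj neighbor) t) = false := by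
          rw [Bool.eq_false_iff]
          intro hc
          obtain ⟨n, _, hn⟩ := List.any_eq_true.1 hc
          exact ht (adj_sub_codes n t ((PySem.Set.contains_iff _ _).1 hn))
        have hct : pvCodes.contains t = false := by
          rw [List.contains_eq_mem, decide_eq_false_iff_not]
          exact ht
        unfold hop_distance_py hop_distance_py_alt
        rw [hbe, hc1, hc2, hct]
        simp
    · have hadj : pvAdj o = [] := adj_of_not_code o ho
      have hco : pvCodes.contains o = false := by
        rw [List.contains_eq_mem, decide_eq_false_iff_not]
        exact ho
      unfold hop_distance_py hop_distance_py_alt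
      rw [hbe, hadj, hco]
      rfl

-- ===== VERDICT (by name: the statement is the Claim_ definition above) =====
theorem hop_distance_py_spec : Claim_equal_hop_distance_py := by
  intro origin shipment_country _
  exact hop_eq origin shipment_country
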